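-- pv_equiv track=rewrite | github.com/SnarkyGoblin123/BTP | NavicExp.py | PRN
-- ===== SOURCE A (Python) =====
-- def PRN(sv):
--         SV = {
--             1: [2,6], 2: [3,7], 3: [4,8], 4: [5,9], 5: [1,9], 6: [2,10], 7: [1,8], 8: [2,9],
--             9: [3,10], 10: [2,3], 11: [3,4], 12: [5,6], 13: [6,7], 14: [7,8], 15: [8,9],
--             16: [9,10], 17: [1,4], 18: [2,5], 19: [3,6], 20: [4,7], 21: [5,8], 22: [6,9],
--             23: [1,3], 24: [4,6], 25: [5,7], 26: [6,8], 27: [7,9], 28: [8,10], 29: [1,6],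
--             30: [2,7], 31: [3,8], 32: [4,9],
--         }
--         def shift(register, feedback, output):
--             out = [register[i-1] for i in output]
--             if len(out) > 1:
--                 out = sum(out) % 2
--             else:
--                 out = out[0]
--             fb = sum([register[i-1] for i in feedback]) % 2
--             for i in reversed(range(len(register[1:]))):
--                 register[i+1] = register[i]
--             register[0] = fb
--             return out
--
--         G1 = [1 for i in range(10)]
--         G2 = [1 for i in range(10)]
--         ca = []
--         for i in range(1023):
--             g1 = shift(G1, [3,10], [10])
--             g2 = shift(G2, [2,3,6,8,9,10], SV[sv])
--             ca.append((g1 + g2) % 2)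
--         return ca
-- ===== SOURCE B (Python) =====
-- def PRN(sv):
--     SV = {
--         1: [2,6], 2: [3,7], 3: [4,8], 4: [5,9], 5: [1,9], 6: [2,10], 7: [1,8], 8: [2,9],
--         9: [3,10], 10: [2,3], 11: [3,4], 12: [5,6], 13: [6,7], 14: [7,8], 15: [8,9],
--         16: [9,10], 17: [1,4], 18: [2,5], 19: [3,6], 20: [4,7], 21: [5,8], 22: [6,9],
--         23: [1,3], 24: [4,6], 25: [5,7], 26: [6,8], 27: [7,9], 28: [8,10], 29: [1,6],
--         30: [2,7], 31: [3,8], 32: [4,9],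
--     }
--     a, b = SV[sv]
--     g1 = 0x3FF
--     g2 = 0x3FF
--     ca = []
--     for _ in range(1023):
--         ca.append(((g1 >> 9) ^ (g2 >> (a - 1)) ^ (g2 >> (b - 1))) & 1)
--         f1 = ((g1 >> 2) ^ (g1 >> 9)) & 1
--         f2 = ((g2 >> 1) ^ (g2 >> 2) ^ (g2 >> 5) ^ (g2 >> 7) ^ (g2 >> 8) ^ (g2 >> 9)) & 1
--         g1 = ((g1 << 1) | f1) & 0x3FF
--         g2 = ((g2 << 1) | f2) & 0x3FF
--     return ca
-- ===== Notes on version B (the rewrite author's own statement) =====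
-- stated objective: idiomatic
-- what changed: Replaces A's two 10-element list registers (shifted element-by-element each tick via a helper that indexes tap positions and sums them mod 2) by two 10-bit integer bitmasks updated with shift/or/and, reading tap bits by shift-and-xor, the standard LFSR idiom.
import Mathlib
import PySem

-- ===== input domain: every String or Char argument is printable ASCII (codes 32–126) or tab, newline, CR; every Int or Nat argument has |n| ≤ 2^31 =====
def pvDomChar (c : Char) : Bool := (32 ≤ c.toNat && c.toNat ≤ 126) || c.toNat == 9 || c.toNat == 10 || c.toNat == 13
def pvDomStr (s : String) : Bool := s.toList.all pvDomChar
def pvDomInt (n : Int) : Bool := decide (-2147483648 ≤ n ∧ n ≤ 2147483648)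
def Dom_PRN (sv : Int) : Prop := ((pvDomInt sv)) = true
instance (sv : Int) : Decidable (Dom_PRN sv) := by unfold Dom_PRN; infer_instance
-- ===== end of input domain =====

-- B replaces A's two 10-element list registers by 10-bit integer bitmasks updated with
-- shift/or/and and tap bits read by shift-and-xor (idiomatic LFSR style); same return value on sv ∈ 1..32.

-- ===== PORT A =====
def pvSV : PySem.Dict Int (List Int) :=
  PySem.Dict.ofList [(1,[2,6]),(2,[3,7]),(3,[4,8]),(4,[5,9]),(5,[1,9]),(6,[2,10]),(7,[1,8]),(8,[2,9]),
    (9,[3,10]),(10,[2,3]),(11,[3,4]),(12,[5,6]),(13,[6,7]),(14,[7,8]),(15,[8,9]),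
    (16,[9,10]),(17,[1,4]),(18,[2,5]),(19,[3,6]),(20,[4,7]),(21,[5,8]),(22,[6,9]),
    (23,[1,3]),(24,[4,6]),(25,[5,7]),(26,[6,8]),(27,[7,9]),(28,[8,10]),(29,[1,6]),
    (30,[2,7]),(31,[3,8]),(32,[4,9])]

-- A's shift helper: returns (out, new register).  register[i-1] with tap i ∈ 1..10 is always
-- in range, so the IndexError case of pyGet? is defaulted to 0 (unreachable); the in-place
-- loop "for i in reversed(range(len(register[1:]))): register[i+1] = register[i]; register[0] = fb"
-- is exactly fb :: register.take (register.length - 1).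
def pvShift (register : List Int) (feedback output : List Int) : Int × List Int :=
  let outs := output.map (fun i => (PySem.List.pyGet? register (i-1)).getD 0)
  let out := if outs.length > 1 then PySem.Int.mod outs.sum 2
             else (PySem.List.pyGet? outs 0).getD 0
  let fb := PySem.Int.mod ((feedback.map (fun i => (PySem.List.pyGet? register (i-1)).getD 0)).sum) 2
  (out, fb :: register.take (register.length - 1))

def PRN (sv : Int) : List Int :=
  -- SV[sv] raises KeyError for sv ∉ 1..32 (excluded by Pre_PRN); the port defaults to [].
  let taps := (PySem.Dict.get? pvSV sv).getD []
  let G1 : List Int := (List.range 10).map (fun _ => 1)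
  let G2 : List Int := (List.range 10).map (fun _ => 1)
  let st := (List.range 1023).foldl
    (fun (s : List Int × List Int × List Int) _ =>
      let p1 := pvShift s.1 [3,10] [10]
      let p2 := pvShift s.2.1 [2,3,6,8,9,10] taps
      (p1.2, p2.2, s.2.2 ++ [PySem.Int.mod (p1.1 + p2.1) 2]))
    (G1, G2, ([] : List Int))
  st.2.2

-- ===== PORT B =====
def PRN_alt (sv : Int) : List Int :=
  -- Python "a, b = SV[sv]" destructures the two-tap list (KeyError for sv ∉ 1..32 is
  -- excluded by Pre_PRN; the port defaults to [] / tap 0).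
  let taps := (PySem.Dict.get? pvSV sv).getD []
  let a := (PySem.List.pyGet? taps 0).getD 0
  let b := (PySem.List.pyGet? taps 1).getD 0
  -- shift counts a-1, b-1 are nonnegative (taps are 1..10), so .toNat is exact
  let ia := (a - 1).toNat
  let ib := (b - 1).toNat
  let st := (List.range 1023).foldl
    (fun (s : Int × Int × List Int) _ =>
      let o := PySem.Int.band (PySem.Int.bxor (PySem.Int.bxor (s.1 >>> (9:Nat)) (s.2.1 >>> ia)) (s.2.1 >>> ib)) 1
      let f1 := PySem.Int.band (PySem.Int.bxor (s.1 >>> (2:Nat)) (s.1 >>> (9:Nat))) 1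
      let f2 := PySem.Int.band (PySem.Int.bxor (PySem.Int.bxor (PySem.Int.bxor (PySem.Int.bxor (PySem.Int.bxor
                  (s.2.1 >>> (1:Nat)) (s.2.1 >>> (2:Nat))) (s.2.1 >>> (5:Nat))) (s.2.1 >>> (7:Nat)))
                  (s.2.1 >>> (8:Nat))) (s.2.1 >>> (9:Nat))) 1
      (PySem.Int.band (PySem.Int.bor (s.1 <<< (1:Nat)) f1) 1023,
       PySem.Int.band (PySem.Int.bor (s.2.1 <<< (1:Nat)) f2) 1023,
       s.2.2 ++ [o]))
    (1023, 1023, ([] : List Int))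
  st.2.2

-- ===== PRECONDITION & SPEC =====
-- Pre_PRN excludes exactly the sv on which A raises KeyError (SV has keys 1..32).
def Pre_PRN (sv : Int) : Prop := 1 ≤ sv ∧ sv ≤ 32
instance (sv : Int) : Decidable (Pre_PRN sv) := by unfold Pre_PRN; infer_instance
def pvWitness_PRN : Int := (7)

def Spec_PRN (sv : Int) (out : List Int) : Prop := out = PRN_alt sv
instance (sv : Int) (out : List Int) : Decidable (Spec_PRN sv out) := by unfold Spec_PRN; infer_instance

-- ===== CLAIM (what is proved, stated in full; the proofs are below) =====
def Claim_equal_PRN : Prop := ∀ (sv : Int), Dom_PRN sv → Pre_PRN sv → Spec_PRN sv (PRN sv)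

-- ===== LEMMAS AND PROOFS =====

-- bit i of a register state, as the 0/1 integer A keeps in its lists
def bitInt (n i : Nat) : Int := if n.testBit i then 1 else 0

-- A's 10-element register holding the bits of n (index i = register[i])
def bitsN (n : Nat) : List Int :=
  [bitInt n 0, bitInt n 1, bitInt n 2, bitInt n 3, bitInt n 4,
   bitInt n 5, bitInt n 6, bitInt n 7, bitInt n 8, bitInt n 9]

def ifN (x : Bool) : Nat := if x then 1 else 0

-- Nat models of B's register updates
def nx1 (n : Nat) : Nat := ((n <<< 1) ||| ifN ((n.testBit 2).xor (n.testBit 9))) &&& 1023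
def nx2 (n : Nat) : Nat :=
  ((n <<< 1) ||| ifN ((((((n.testBit 1).xor (n.testBit 2)).xor (n.testBit 5)).xor
      (n.testBit 7)).xor (n.testBit 8)).xor (n.testBit 9))) &&& 1023

def outBit (n1 n2 ia ib : Nat) : Int :=
  if ((n1.testBit 9).xor (n2.testBit ia)).xor (n2.testBit ib) then 1 else 0

-- the two loop bodies, as named step functions (definitionally the ports' lambdas)
def fA (t : List Int) : (List Int × List Int × List Int) → Nat → (List Int × List Int × List Int) :=
  fun s _ =>
    let p1 := pvShift s.1 [3,10] [10]
    let p2 := pvShift s.2.1 [2,3,6,8,9,10] t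
    (p1.2, p2.2, s.2.2 ++ [PySem.Int.mod (p1.1 + p2.1) 2])

def fB (ia ib : Nat) : (Int × Int × List Int) → Nat → (Int × Int × List Int) :=
  fun s _ =>
    let o := PySem.Int.band (PySem.Int.bxor (PySem.Int.bxor (s.1 >>> (9:Nat)) (s.2.1 >>> ia)) (s.2.1 >>> ib)) 1
    let f1 := PySem.Int.band (PySem.Int.bxor (s.1 >>> (2:Nat)) (s.1 >>> (9:Nat))) 1
    let f2 := PySem.Int.band (PySem.Int.bxor (PySem.Int.bxor (PySem.Int.bxor (PySem.Int.bxor (PySem.Int.bxor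
                (s.2.1 >>> (1:Nat)) (s.2.1 >>> (2:Nat))) (s.2.1 >>> (5:Nat))) (s.2.1 >>> (7:Nat)))
                (s.2.1 >>> (8:Nat))) (s.2.1 >>> (9:Nat))) 1
    (PySem.Int.band (PySem.Int.bor (s.1 <<< (1:Nat)) f1) 1023,
     PySem.Int.band (PySem.Int.bor (s.2.1 <<< (1:Nat)) f2) 1023,
     s.2.2 ++ [o])

-- casts: Python shifts on nonnegative ints
lemma shiftR_cast (m k : Nat) : ((m:Int) >>> k) = ((m >>> k : Nat) : Int) := rfl
lemma shiftL_cast (m k : Nat) : ((m:Int) <<< k) = ((m <<< k : Nat) : Int) := rfl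

lemma natAnd1 (d : Nat) : (d &&& 1) = ifN (d.testBit 0) := by
  rcases Nat.mod_two_eq_zero_or_one d with h | h <;>
    simp [Nat.and_one_is_mod, Nat.testBit_zero, ifN, h]

lemma bandCast1 (x : Nat) : PySem.Int.band (x:Int) 1 = if x.testBit 0 then 1 else 0 := by
  rw [show (1:Int) = ((1:Nat):Int) from rfl, PySem.Int.band_natCast, natAnd1]
  cases h : x.testBit 0 <;> simp [ifN]

-- Bool-level correspondence between A's sum-mod-2 and B's xor chains
lemma outA3 (x y z : Bool) :
    PySem.Int.mod ((if x then (1:Int) else 0)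
      + PySem.Int.mod ((if y then (1:Int) else 0) + ((if z then (1:Int) else 0) + 0)) 2) 2
    = if (x.xor y).xor z then 1 else 0 := by
  cases x <;> cases y <;> cases z <;> decide

lemma fb2 (x y : Bool) :
    PySem.Int.mod ((if x then (1:Int) else 0) + ((if y then (1:Int) else 0) + 0)) 2
    = if x.xor y then 1 else 0 := by
  cases x <;> cases y <;> decide

lemma fb6 (b1 b2 b3 b4 b5 b6 : Bool) :
    PySem.Int.mod ((if b1 then (1:Int) else 0) + ((if b2 then (1:Int) else 0)
      + ((if b3 then (1:Int) else 0) + ((if b4 then (1:Int) else 0)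
      + ((if b5 then (1:Int) else 0) + ((if b6 then (1:Int) else 0) + 0)))))) 2
    = if ((((b1.xor b2).xor b3).xor b4).xor b5).xor b6 then 1 else 0 := by
  cases b1 <;> cases b2 <;> cases b3 <;> cases b4 <;> cases b5 <;> cases b6 <;> decide

-- B's output bit
lemma outB_eq (n1 n2 ia ib : Nat) :
    PySem.Int.band (PySem.Int.bxor (PySem.Int.bxor ((n1:Int) >>> (9:Nat)) ((n2:Int) >>> ia)) ((n2:Int) >>> ib)) 1
    = outBit n1 n2 ia ib := by
  rw [shiftR_cast, shiftR_cast, shiftR_cast, PySem.Int.bxor_natCast, PySem.Int.bxor_natCast, bandCast1]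
  simp only [outBit, Nat.testBit_xor, Nat.testBit_shiftRight, Nat.add_zero]

-- B's feedback bits
lemma fB2_eq (n : Nat) :
    PySem.Int.band (PySem.Int.bxor ((n:Int) >>> (2:Nat)) ((n:Int) >>> (9:Nat))) 1
    = if (n.testBit 2).xor (n.testBit 9) then 1 else 0 := by
  rw [shiftR_cast, shiftR_cast, PySem.Int.bxor_natCast, bandCast1]
  simp only [Nat.testBit_xor, Nat.testBit_shiftRight, Nat.add_zero]

lemma fB6_eq (n : Nat) :
    PySem.Int.band (PySem.Int.bxor (PySem.Int.bxor (PySem.Int.bxor (PySem.Int.bxor (PySem.Int.bxor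
      ((n:Int) >>> (1:Nat)) ((n:Int) >>> (2:Nat))) ((n:Int) >>> (5:Nat))) ((n:Int) >>> (7:Nat)))
      ((n:Int) >>> (8:Nat))) ((n:Int) >>> (9:Nat))) 1
    = if ((((((n.testBit 1).xor (n.testBit 2)).xor (n.testBit 5)).xor
        (n.testBit 7)).xor (n.testBit 8)).xor (n.testBit 9)) then 1 else 0 := by
  rw [shiftR_cast, shiftR_cast, shiftR_cast, shiftR_cast, shiftR_cast, shiftR_cast,
      PySem.Int.bxor_natCast, PySem.Int.bxor_natCast, PySem.Int.bxor_natCast,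
      PySem.Int.bxor_natCast, PySem.Int.bxor_natCast, bandCast1]
  simp only [Nat.testBit_xor, Nat.testBit_shiftRight, Nat.add_zero]

-- bits of the shifted register
lemma nextBits (n : Nat) (f : Bool) :
    bitsN (((n <<< 1) ||| ifN f) &&& 1023)
      = (if f then (1:Int) else 0) ::
        [bitInt n 0, bitInt n 1, bitInt n 2, bitInt n 3, bitInt n 4,
         bitInt n 5, bitInt n 6, bitInt n 7, bitInt n 8] := by
  have hm : ∀ i, (1023:Nat).testBit i = decide (i < 10) := fun i => by
    rw [show (1023:Nat) = 2^10 - 1 from by norm_num, Nat.testBit_two_pow_sub_one]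
  have h1 : ∀ i, (1:Nat).testBit i = decide (0 = i) := fun i => by
    rw [show (1:Nat) = 2^0 from rfl, Nat.testBit_two_pow]
  have h0 : ∀ i, (0:Nat).testBit i = false := Nat.zero_testBit
  cases f <;>
    simp [bitsN, bitInt, ifN, Nat.testBit_lor, Nat.testBit_shiftLeft, hm, h1]

-- B's register update, cast to the Nat model
lemma nextB (n : Nat) (f : Bool) :
    PySem.Int.band (PySem.Int.bor ((n:Int) <<< (1:Nat)) (if f then (1:Int) else 0)) 1023
      = ((((n <<< 1) ||| ifN f) &&& 1023 : Nat) : Int) := by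
  cases f <;>
    rw [shiftL_cast] <;>
    [rw [show ((if false then (1:Int) else 0)) = ((0:Nat):Int) from rfl];
     rw [show ((if true then (1:Int) else 0)) = ((1:Nat):Int) from rfl]] <;>
    rw [PySem.Int.bor_natCast, show (1023:Int) = ((1023:Nat):Int) from rfl,
      PySem.Int.band_natCast] <;> rfl

-- one loop iteration, A side
lemma stepA (t : List Int) (ia ib : Nat)
    (hfst : ∀ n : Nat, (pvShift (bitsN n) [2,3,6,8,9,10] t).1
        = PySem.Int.mod (bitInt n ia + (bitInt n ib + 0)) 2)
    (n1 n2 : Nat) (ca : List Int) (j : Nat) :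
    fA t (bitsN n1, bitsN n2, ca) j
      = (bitsN (nx1 n1), bitsN (nx2 n2), ca ++ [outBit n1 n2 ia ib]) := by
  have e1 : pvShift (bitsN n1) [3,10] [10]
      = (bitInt n1 9, PySem.Int.mod (bitInt n1 2 + (bitInt n1 9 + 0)) 2 ::
         [bitInt n1 0, bitInt n1 1, bitInt n1 2, bitInt n1 3, bitInt n1 4,
          bitInt n1 5, bitInt n1 6, bitInt n1 7, bitInt n1 8]) := rfl
  have e2 : (pvShift (bitsN n2) [2,3,6,8,9,10] t).2
      = PySem.Int.mod (bitInt n2 1 + (bitInt n2 2 + (bitInt n2 5 + (bitInt n2 7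
          + (bitInt n2 8 + (bitInt n2 9 + 0)))))) 2 ::
         [bitInt n2 0, bitInt n2 1, bitInt n2 2, bitInt n2 3, bitInt n2 4,
          bitInt n2 5, bitInt n2 6, bitInt n2 7, bitInt n2 8] := rfl
  unfold fA
  dsimp only []
  rw [e1, e2, hfst n2]
  simp only [nx1, nx2]
  rw [nextBits n1 ((n1.testBit 2).xor (n1.testBit 9)),
      nextBits n2 ((((((n2.testBit 1).xor (n2.testBit 2)).xor (n2.testBit 5)).xor
        (n2.testBit 7)).xor (n2.testBit 8)).xor (n2.testBit 9))]
  simp only [bitInt, outBit]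
  rw [fb2, fb6, outA3]

-- one loop iteration, B side
lemma stepB (ia ib : Nat) (n1 n2 : Nat) (ca : List Int) (j : Nat) :
    fB ia ib ((n1:Int), (n2:Int), ca) j
      = (((nx1 n1 : Nat) : Int), ((nx2 n2 : Nat) : Int), ca ++ [outBit n1 n2 ia ib]) := by
  unfold fB
  dsimp only []
  rw [outB_eq, fB2_eq, fB6_eq, nextB n1 _, nextB n2 _]
  simp only [nx1, nx2]

-- the two folds stay in lockstep
lemma sim (t : List Int) (ia ib : Nat)
    (hfst : ∀ n : Nat, (pvShift (bitsN n) [2,3,6,8,9,10] t).1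
        = PySem.Int.mod (bitInt n ia + (bitInt n ib + 0)) 2) :
    ∀ (k : Nat) (n1 n2 : Nat) (ca : List Int), ∃ m1 m2 : Nat,
      (List.range k).foldl (fA t) (bitsN n1, bitsN n2, ca)
          = (bitsN m1, bitsN m2, ((List.range k).foldl (fB ia ib) ((n1:Int), (n2:Int), ca)).2.2)
      ∧ (List.range k).foldl (fB ia ib) ((n1:Int), (n2:Int), ca)
          = ((m1:Int), (m2:Int), ((List.range k).foldl (fB ia ib) ((n1:Int), (n2:Int), ca)).2.2) := by
  intro k
  induction k with
  | zero => intro n1 n2 ca; exact ⟨n1, n2, rfl, rfl⟩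
  | succ k ih =>
    intro n1 n2 ca
    obtain ⟨m1, m2, hA, hB⟩ := ih n1 n2 ca
    refine ⟨nx1 m1, nx2 m2, ?_, ?_⟩
    · simp only [List.range_succ, List.foldl_append, List.foldl_cons, List.foldl_nil]
      rw [hA, hB, stepA t ia ib hfst m1 m2 _ k, stepB ia ib m1 m2 _ k]
    · simp only [List.range_succ, List.foldl_append, List.foldl_cons, List.foldl_nil]
      rw [hB, stepB ia ib m1 m2 _ k]

theorem mainEq (t : List Int) (ia ib : Nat)
    (hfst : ∀ n : Nat, (pvShift (bitsN n) [2,3,6,8,9,10] t).1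
        = PySem.Int.mod (bitInt n ia + (bitInt n ib + 0)) 2) :
    ((List.range 1023).foldl (fA t)
        ((List.range 10).map (fun _ => 1), (List.range 10).map (fun _ => 1), ([]:List Int))).2.2
    = ((List.range 1023).foldl (fB ia ib) (1023, 1023, ([]:List Int))).2.2 := by
  have hb : (List.range 10).map (fun _ => (1:Int)) = bitsN 1023 := by decide
  have hc : (1023:Int) = ((1023:Nat):Int) := rfl
  obtain ⟨m1, m2, hA, hB⟩ := sim t ia ib hfst 1023 1023 1023 []
  rw [hb, hc, hA]

-- the ports are their folds (definitional)
lemma foldA_congr (t : List Int) (init : List Int × List Int × List Int) :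
    (List.range 1023).foldl (fun (s : List Int × List Int × List Int) (_ : Nat) =>
      let p1 := pvShift s.1 [3,10] [10]
      let p2 := pvShift s.2.1 [2,3,6,8,9,10] t
      (p1.2, p2.2, s.2.2 ++ [PySem.Int.mod (p1.1 + p2.1) 2])) init
    = (List.range 1023).foldl (fA t) init := rfl

lemma foldB_congr (ia ib : Nat) (init : Int × Int × List Int) :
    (List.range 1023).foldl (fun (s : Int × Int × List Int) (_ : Nat) =>
      let o := PySem.Int.band (PySem.Int.bxor (PySem.Int.bxor (s.1 >>> (9:Nat)) (s.2.1 >>> ia)) (s.2.1 >>> ib)) 1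
      let f1 := PySem.Int.band (PySem.Int.bxor (s.1 >>> (2:Nat)) (s.1 >>> (9:Nat))) 1
      let f2 := PySem.Int.band (PySem.Int.bxor (PySem.Int.bxor (PySem.Int.bxor (PySem.Int.bxor (PySem.Int.bxor
                  (s.2.1 >>> (1:Nat)) (s.2.1 >>> (2:Nat))) (s.2.1 >>> (5:Nat))) (s.2.1 >>> (7:Nat)))
                  (s.2.1 >>> (8:Nat))) (s.2.1 >>> (9:Nat))) 1
      (PySem.Int.band (PySem.Int.bor (s.1 <<< (1:Nat)) f1) 1023,
       PySem.Int.band (PySem.Int.bor (s.2.1 <<< (1:Nat)) f2) 1023,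
       s.2.2 ++ [o])) init
    = (List.range 1023).foldl (fB ia ib) init := rfl

lemma bridgeA (sv : Int) :
    PRN sv = ((List.range 1023).foldl (fA ((PySem.Dict.get? pvSV sv).getD []))
      ((List.range 10).map (fun _ => 1), (List.range 10).map (fun _ => 1), ([]:List Int))).2.2 := by
  unfold PRN
  dsimp only []
  rw [foldA_congr]

lemma bridgeB (sv : Int) :
    PRN_alt sv = ((List.range 1023).foldl
      (fB (((PySem.List.pyGet? ((PySem.Dict.get? pvSV sv).getD []) 0).getD 0 - 1).toNat)
          ((((PySem.List.pyGet? ((PySem.Dict.get? pvSV sv).getD []) 1).getD 0 - 1).toNat)))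
      (1023, 1023, ([]:List Int))).2.2 := by
  unfold PRN_alt
  dsimp only []
  rw [foldB_congr]

-- ===== VERDICT (by name: the statement is the Claim_ definition above) =====
theorem PRN_spec : Claim_equal_PRN := by
  intro sv _ hp
  unfold Spec_PRN
  obtain ⟨h1, h2⟩ := hp
  rw [bridgeA, bridgeB]
  interval_cases sv <;> exact mainEq _ _ _ (fun n => rfl)
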